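-- pv_equiv track=rewrite | github.com/AlanFermat/leetcode | recursion + DP/878 nthMagicNum.py | nthMagicalNumber
-- ===== SOURCE A (Python) =====
-- def nthMagicalNumber(N, A, B):
-- 	"""
-- 	:type N: int
-- 	:type A: int
-- 	:type B: int
-- 	:rtype: int
-- 	"""
-- #
-- 	if A >= B:
-- 		A, B = B, A
-- 	lower, upper = A, A*N
-- 	def gcd(x, y):
-- 		if x == y:
-- 			return x
-- 		if x > y:
-- 			x, y = y, x
-- 		while x:
-- 			x, y = y % x, x
-- 		return y
-- 	lcm_A_B = A * B // gcd(A,B)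
-- 	def getMagic(x):
-- 		return x//A + x//B - x//lcm_A_B
-- 	def binarySearch(l, r, goal):
-- 		mid = (l + r)//2
-- 		if getMagic(mid) == goal:
-- 			if not mid % A or not mid % B:
-- 				return mid
-- 			else:
-- 				return binarySearch(l,mid-1,goal)
-- 		elif getMagic(mid) > goal:
-- 			return binarySearch(l,mid-1,goal)
-- 		else:
-- 			return binarySearch(mid+1,r,goal)
-- 	return binarySearch(lower, upper, N)% (10**9 + 7)
-- ===== SOURCE B (Python) =====
-- def nthMagicalNumber(N, A, B):
--     def g(x, y):
--         return x if y == 0 else g(y, x % y)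
--     a, b = (A, B) if A <= B else (B, A)
--     lcm = a * b // g(a, b)
--     def count(x):
--         return x // a + x // b - x // lcm
--     lo, hi = a, a * N
--     while lo < hi:
--         mid = (lo + hi) // 2
--         if count(mid) < N:
--             lo = mid + 1
--         else:
--             hi = mid
--     return lo % (10 ** 9 + 7)
-- ===== Notes on version B (the rewrite author's own statement) =====
-- stated objective: simpler
-- what changed: B replaces A's recursive binary search that hunts for an exact count-N hit (with a divisibility test and three-way branching) by the standard iterative lower-bound loop 'while lo < hi' on count(x) >= N, and A's imperative while-loop gcd (with equality/swap pre-checks) by a one-line recursive Euclid.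
-- outside the precondition, e.g. on nthMagicalNumber(0, 1, 5): A returns 0, B returns 1
import Mathlib
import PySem

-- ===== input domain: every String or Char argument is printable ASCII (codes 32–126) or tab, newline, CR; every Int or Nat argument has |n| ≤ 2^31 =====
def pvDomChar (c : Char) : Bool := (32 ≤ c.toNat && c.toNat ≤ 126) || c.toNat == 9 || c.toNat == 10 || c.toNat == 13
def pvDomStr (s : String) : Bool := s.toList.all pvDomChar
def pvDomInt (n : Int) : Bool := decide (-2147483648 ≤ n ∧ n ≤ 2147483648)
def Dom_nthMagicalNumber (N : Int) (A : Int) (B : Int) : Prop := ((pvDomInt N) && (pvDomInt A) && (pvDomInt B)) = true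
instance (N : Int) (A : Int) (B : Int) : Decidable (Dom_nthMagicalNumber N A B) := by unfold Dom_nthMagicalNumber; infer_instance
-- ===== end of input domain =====

-- B replaces A's recursive find-the-exact-count binary search by the standard iterative
-- lower-bound loop (least x with count(x) ≥ N) and a recursive one-line Euclid; objective: simpler.

-- ===== PORT A =====

-- termination fact for the ports' Euclid loops: |y % x| < |x| for x ≠ 0 (Python mod)
theorem pvModAbsLt (y x : Int) (hx : x ≠ 0) : (PySem.Int.mod y x).natAbs < x.natAbs := by
  rcases lt_or_gt_of_ne hx with h | h
  · have := PySem.Int.mod_neg_bounds y h; omega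
  · have h1 := PySem.Int.mod_nonneg y h; have h2 := PySem.Int.mod_lt y h; omega

-- A's inner 'while x: x, y = y % x, x'
def pvGcdLoopA (x y : Int) : Int :=
  if h : x = 0 then y
  else pvGcdLoopA (PySem.Int.mod y x) x
termination_by x.natAbs
decreasing_by exact pvModAbsLt y x h

-- A's def gcd(x, y)
def pvGcdA (x y : Int) : Int :=
  if x = y then x
  else if x > y then pvGcdLoopA y x
  else pvGcdLoopA x y

-- A's def getMagic(x)  (A, B, lcm_A_B are the enclosing function's locals)
def pvMagicA (a b l x : Int) : Int :=
  PySem.Int.floordiv x a + PySem.Int.floordiv x b - PySem.Int.floordiv x l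

-- A's def binarySearch(l, r, goal); the 'r < l' guard only makes the recursion total:
-- there Python recurses forever (outside Pre_), the returned 0 is arbitrary
def pvBsA (a b lcm goal l r : Int) : Int :=
  if hlr : r < l then 0
  else
    let mid := PySem.Int.floordiv (l + r) 2
    if pvMagicA a b lcm mid = goal then
      if PySem.Int.mod mid a = 0 ∨ PySem.Int.mod mid b = 0 then mid
      else pvBsA a b lcm goal l (mid - 1)
    else if pvMagicA a b lcm mid > goal then pvBsA a b lcm goal l (mid - 1)
    else pvBsA a b lcm goal (mid + 1) r
termination_by (r - l + 1).toNat
decreasing_by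
  all_goals
    have hb := PySem.Int.floordiv_two_mid_bounds (lo := l) (hi := r) (by omega)
    omega

def nthMagicalNumber (N : Int) (A : Int) (B : Int) : Int :=
  let A' := if A ≥ B then B else A
  let B' := if A ≥ B then A else B
  let lower := A'
  let upper := A' * N
  let lcm := PySem.Int.floordiv (A' * B') (pvGcdA A' B')
  PySem.Int.mod (pvBsA A' B' lcm N lower upper) (10 ^ 9 + 7)

-- ===== PORT B =====

-- B's def g(x, y): one-line recursive Euclid
def pvGcdB (x y : Int) : Int :=
  if h : y = 0 then x
  else pvGcdB y (PySem.Int.mod x y)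
termination_by y.natAbs
decreasing_by exact pvModAbsLt x y h

-- B's def count(x)
def pvCountB (a b lcm x : Int) : Int :=
  PySem.Int.floordiv x a + PySem.Int.floordiv x b - PySem.Int.floordiv x lcm

-- B's 'while lo < hi' lower-bound loop
def pvLoopB (a b lcm N lo hi : Int) : Int :=
  if h : lo < hi then
    let mid := PySem.Int.floordiv (lo + hi) 2
    if pvCountB a b lcm mid < N then pvLoopB a b lcm N (mid + 1) hi
    else pvLoopB a b lcm N lo mid
  else lo
termination_by (hi - lo).toNat
decreasing_by
  all_goals
    have hb := PySem.Int.floordiv_two_mid_bounds (lo := lo) (hi := hi) (by omega)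
    have hc : PySem.Int.floordiv (lo + hi) 2 < hi :=
      (PySem.Int.floordiv_lt_iff_lt_mul (by omega)).mpr (by omega)
    omega

def nthMagicalNumber_alt (N : Int) (A : Int) (B : Int) : Int :=
  let a := if A ≤ B then A else B
  let b := if A ≤ B then B else A
  let lcm := PySem.Int.floordiv (a * b) (pvGcdB a b)
  PySem.Int.mod (pvLoopB a b lcm N a (a * N)) (10 ^ 9 + 7)

-- ===== PRECONDITION & SPEC =====
-- Pre_ excludes non-positive N, A or B: there Python A raises (ZeroDivisionError when
-- min(A,B) = 0, else RecursionError from an unbounded binary-search recursion), except the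
-- degenerate corner N ≤ 0 with min(A,B) = 1 where A returns 0 out of an empty search range.
def Pre_nthMagicalNumber (N : Int) (A : Int) (B : Int) : Prop := 1 ≤ N ∧ 1 ≤ A ∧ 1 ≤ B
instance (N : Int) (A : Int) (B : Int) : Decidable (Pre_nthMagicalNumber N A B) := by
  unfold Pre_nthMagicalNumber; infer_instance

def pvWitness_nthMagicalNumber : Int × Int × Int := (5, 2, 4)

def Spec_nthMagicalNumber (N : Int) (A : Int) (B : Int) (out : Int) : Prop := out = nthMagicalNumber_alt N A B
instance (N : Int) (A : Int) (B : Int) (out : Int) : Decidable (Spec_nthMagicalNumber N A B out) := by unfold Spec_nthMagicalNumber; infer_instance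

-- ===== CLAIM (what is proved, stated in full; the proofs are below) =====
def Claim_equal_nthMagicalNumber : Prop := ∀ (N : Int) (A : Int) (B : Int), Dom_nthMagicalNumber N A B → Pre_nthMagicalNumber N A B → Spec_nthMagicalNumber N A B (nthMagicalNumber N A B)

-- ===== LEMMAS AND PROOFS =====

-- A's gcd loop and B's recursive Euclid compute the same value (argument order flipped)
theorem pvGcdLoopA_eq (x y : Int) : pvGcdLoopA x y = pvGcdB y x := by
  rw [pvGcdLoopA, pvGcdB]
  by_cases hx : x = 0
  · simp [hx]
  · simp only [dif_neg hx]
    exact pvGcdLoopA_eq (PySem.Int.mod y x) x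
termination_by x.natAbs
decreasing_by exact pvModAbsLt y x hx

theorem pvGcdB_eq_gcd (x y : Int) (hx : 0 ≤ x) (hy : 0 ≤ y) : pvGcdB x y = Int.gcd x y := by
  rw [pvGcdB]
  by_cases hy0 : y = 0
  · simp [hy0, Int.gcd, Int.natAbs_of_nonneg hx]
  · have hypos : 0 < y := lt_of_le_of_ne hy (Ne.symm hy0)
    rw [dif_neg hy0, PySem.Int.mod_eq_emod_of_pos hypos,
      pvGcdB_eq_gcd y (x % y) hy (Int.emod_nonneg x hy0)]
    have h : x % y = x + y * (-(x / y)) := by rw [Int.emod_def]; ring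
    rw [h, Int.gcd_add_mul_left_right y x (-(x / y)), Int.gcd_comm]
termination_by y.natAbs
decreasing_by
  have h1 := Int.emod_nonneg x hy0
  have h2 := Int.emod_lt_of_pos x hypos
  omega

theorem pvGcdA_eq (a b : Int) (ha : 1 ≤ a) (hab : a ≤ b) : pvGcdA a b = pvGcdB a b := by
  rw [pvGcdA]
  by_cases hEq : a = b
  · subst hEq
    rw [if_pos rfl, pvGcdB, dif_neg (by omega : a ≠ 0)]
    have hmod : PySem.Int.mod a a = 0 := by
      rw [PySem.Int.mod_eq_emod_of_pos (by omega), Int.emod_self]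
    rw [hmod, pvGcdB, dif_pos rfl]
  · have hlt : a < b := lt_of_le_of_ne hab hEq
    rw [if_neg hEq, if_neg (by omega : ¬ a > b), pvGcdLoopA_eq]
    conv_rhs => rw [pvGcdB, dif_neg (by omega : b ≠ 0)]
    have hmod : PySem.Int.mod a b = a := by
      rw [PySem.Int.mod_eq_emod_of_pos (by omega)]
      exact Int.emod_eq_of_lt (by omega) hlt
    rw [hmod]

-- x // d steps by 1 exactly at the multiples of d
theorem pvDivStep (d x : Int) (hd : 0 < d) :
    PySem.Int.floordiv x d = PySem.Int.floordiv (x - 1) d + (if d ∣ x then 1 else 0) := by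
  have h1 := (PySem.Int.floordiv_eq_iff_of_pos (b := d) hd
    (q := PySem.Int.floordiv (x - 1) d)).mp rfl
  set q := PySem.Int.floordiv (x - 1) d with hq
  by_cases hdvd : d ∣ x
  · obtain ⟨k, hk⟩ := hdvd
    have hk' : x = k * d := by rw [hk]; ring
    rw [if_pos ⟨k, hk⟩, PySem.Int.floordiv_eq_iff_of_pos hd]
    have hqk : q < k := by
      by_contra hcon
      have : k * d ≤ q * d := mul_le_mul_of_nonneg_right (by omega) (le_of_lt hd)
      linarith [h1.1]
    constructor
    · have : (q + 1) * d ≤ k * d := mul_le_mul_of_nonneg_right (by omega) (le_of_lt hd)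
      linarith
    · linarith [h1.2]
  · rw [if_neg hdvd, add_zero, PySem.Int.floordiv_eq_iff_of_pos hd]
    refine ⟨by linarith [h1.1], ?_⟩
    rcases lt_or_eq_of_le (by linarith [h1.2] : x ≤ (q + 1) * d) with h | h
    · exact h
    · exact absurd ⟨q + 1, by rw [h]; ring⟩ hdvd

-- the count steps by 1 exactly at the magical numbers
theorem pvCntStep (a b L x : Int) (ha : 0 < a) (hb : 0 < b) (hL : 0 < L)
    (hiff : ∀ z, L ∣ z ↔ a ∣ z ∧ b ∣ z) :
    pvMagicA a b L x = pvMagicA a b L (x - 1) + (if a ∣ x ∨ b ∣ x then 1 else 0) := by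
  unfold pvMagicA
  rw [pvDivStep a x ha, pvDivStep b x hb, pvDivStep L x hL]
  by_cases h1 : a ∣ x <;> by_cases h2 : b ∣ x <;> simp [h1, h2, hiff x] <;> ring

-- the count is monotone
theorem pvCntMono (a b L : Int) (ha : 0 < a) (hb : 0 < b) (hL : 0 < L)
    (hiff : ∀ z, L ∣ z ↔ a ∣ z ∧ b ∣ z) (x y : Int) (h : x ≤ y) :
    pvMagicA a b L x ≤ pvMagicA a b L y := by
  rcases eq_or_lt_of_le h with rfl | hlt
  · exact le_refl _
  · have ih := pvCntMono a b L ha hb hL hiff x (y - 1) (by omega)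
    have hs := pvCntStep a b L y ha hb hL hiff
    by_cases hd : a ∣ y ∨ b ∣ y <;> simp [hd] at hs <;> omega
termination_by (y - x).toNat

-- a magical number whose count is N is unique
theorem pvUnique (a b L N m : Int) (ha : 0 < a) (hb : 0 < b) (hL : 0 < L)
    (hiff : ∀ z, L ∣ z ↔ a ∣ z ∧ b ∣ z)
    (hmd : a ∣ m ∨ b ∣ m) (hmc : pvMagicA a b L m = N)
    (z : Int) (hzd : a ∣ z ∨ b ∣ z) (hzc : pvMagicA a b L z = N) : z = m := by
  by_contra hne
  rcases lt_or_gt_of_ne hne with hlt | hgt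
  · have h1 := pvCntStep a b L m ha hb hL hiff
    rw [if_pos hmd] at h1
    have h2 := pvCntMono a b L ha hb hL hiff z (m - 1) (by omega)
    omega
  · have h1 := pvCntStep a b L z ha hb hL hiff
    rw [if_pos hzd] at h1
    have h2 := pvCntMono a b L ha hb hL hiff m (z - 1) (by omega)
    omega

-- A's recursive binary search homes in on the unique magical number with count N
theorem pvBsA_finds (a b L N m : Int) (ha : 0 < a) (hb : 0 < b) (hL : 0 < L)
    (hiff : ∀ z, L ∣ z ↔ a ∣ z ∧ b ∣ z)
    (hmd : a ∣ m ∨ b ∣ m) (hmc : pvMagicA a b L m = N)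
    (l r : Int) (hlm : l ≤ m) (hmr : m ≤ r) : pvBsA a b L N l r = m := by
  rw [pvBsA, dif_neg (by omega : ¬ r < l)]
  have hmid := PySem.Int.floordiv_two_mid_bounds (lo := l) (hi := r) (by omega)
  set mid := PySem.Int.floordiv (l + r) 2 with hmiddef
  by_cases hcn : pvMagicA a b L mid = N
  · rw [if_pos hcn]
    by_cases hdv : PySem.Int.mod mid a = 0 ∨ PySem.Int.mod mid b = 0
    · rw [if_pos hdv]
      rw [PySem.Int.mod_eq_zero_iff_dvd, PySem.Int.mod_eq_zero_iff_dvd] at hdv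
      exact pvUnique a b L N m ha hb hL hiff hmd hmc mid hdv hcn
    · rw [if_neg hdv]
      push Not at hdv
      have hdva : ¬ a ∣ mid := fun h => hdv.1 ((PySem.Int.mod_eq_zero_iff_dvd mid a).mpr h)
      have hdvb : ¬ b ∣ mid := fun h => hdv.2 ((PySem.Int.mod_eq_zero_iff_dvd mid b).mpr h)
      have hmmid : m ≤ mid - 1 := by
        have hne : mid ≠ m := by
          rintro rfl
          rcases hmd with h | h
          · exact hdva h
          · exact hdvb h
        rcases lt_or_gt_of_ne hne with hlt | hgt
        · -- mid < m : count mid ≤ count (m-1) = N - 1, contradiction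
          have h1 := pvCntStep a b L m ha hb hL hiff
          rw [if_pos hmd] at h1
          have h2 := pvCntMono a b L ha hb hL hiff mid (m - 1) (by omega)
          omega
        · omega
      exact pvBsA_finds a b L N m ha hb hL hiff hmd hmc l (mid - 1) hlm hmmid
  · rw [if_neg hcn]
    by_cases hgt : pvMagicA a b L mid > N
    · rw [if_pos hgt]
      have hmmid : m ≤ mid - 1 := by
        by_contra hcon
        have h2 := pvCntMono a b L ha hb hL hiff mid m (by omega)
        omega
      exact pvBsA_finds a b L N m ha hb hL hiff hmd hmc l (mid - 1) hlm hmmid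
    · rw [if_neg hgt]
      have hmidm : mid + 1 ≤ m := by
        by_contra hcon
        have h2 := pvCntMono a b L ha hb hL hiff m mid (by omega)
        omega
      exact pvBsA_finds a b L N m ha hb hL hiff hmd hmc (mid + 1) r hmidm hmr
termination_by (r - l + 1).toNat
decreasing_by all_goals omega

-- B's lower-bound loop converges to the same number
theorem pvLoopB_finds (a b L N m : Int) (ha : 0 < a) (hb : 0 < b) (hL : 0 < L)
    (hiff : ∀ z, L ∣ z ↔ a ∣ z ∧ b ∣ z)
    (hmd : a ∣ m ∨ b ∣ m) (hmc : pvMagicA a b L m = N)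
    (lo hi : Int) (hlom : lo ≤ m) (hmhi : m ≤ hi) : pvLoopB a b L N lo hi = m := by
  rw [pvLoopB]
  by_cases hlh : lo < hi
  · rw [dif_pos hlh]
    have hmid := PySem.Int.floordiv_two_mid_bounds (lo := lo) (hi := hi) (by omega)
    have hmid2 : PySem.Int.floordiv (lo + hi) 2 < hi :=
      (PySem.Int.floordiv_lt_iff_lt_mul (by omega)).mpr (by omega)
    set mid := PySem.Int.floordiv (lo + hi) 2 with hmiddef
    have hCB : pvCountB a b L mid = pvMagicA a b L mid := rfl
    by_cases hc : pvCountB a b L mid < N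
    · rw [if_pos hc]
      have hmidm : mid + 1 ≤ m := by
        by_contra hcon
        have h2 := pvCntMono a b L ha hb hL hiff m mid (by omega)
        omega
      exact pvLoopB_finds a b L N m ha hb hL hiff hmd hmc (mid + 1) hi hmidm hmhi
    · rw [if_neg hc]
      have hmmid : m ≤ mid := by
        by_contra hcon
        have h1 := pvCntStep a b L m ha hb hL hiff
        rw [if_pos hmd] at h1
        have h2 := pvCntMono a b L ha hb hL hiff mid (m - 1) (by omega)
        omega
      exact pvLoopB_finds a b L N m ha hb hL hiff hmd hmc lo mid hlom hmmid
  · rw [dif_neg hlh]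
    omega
termination_by (hi - lo).toNat
decreasing_by all_goals omega

-- existence of the N-th magical number in [a, a*N]
theorem pvExists (a b L N : Int) (ha : 0 < a) (hab : a ≤ b) (hbL : b ≤ L) (hL : 0 < L)
    (hiff : ∀ z, L ∣ z ↔ a ∣ z ∧ b ∣ z) (hN : 1 ≤ N) :
    ∃ m, (a ∣ m ∨ b ∣ m) ∧ pvMagicA a b L m = N ∧ a ≤ m ∧ m ≤ a * N := by
  have haN : a ≤ a * N := le_mul_of_one_le_right (by omega) hN
  have htop : N ≤ pvMagicA a b L (a * N) := by
    unfold pvMagicA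
    have h1 : PySem.Int.floordiv (a * N) a = N := by
      rw [PySem.Int.floordiv_eq_iff_of_pos (by omega)]
      constructor <;> nlinarith
    have h2 : PySem.Int.floordiv (a * N) L ≤ PySem.Int.floordiv (a * N) b := by
      have hq := PySem.Int.floordiv_mul_add_mod (a * N) L
      have hqm := PySem.Int.mod_nonneg (a * N) hL
      set q := PySem.Int.floordiv (a * N) L with hqdef
      have hq0 : 0 ≤ q := by
        by_contra hcon
        have hqlt := PySem.Int.mod_lt (a * N) hL
        nlinarith
      rw [PySem.Int.le_floordiv_iff_mul_le (by omega)]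
      nlinarith
    omega
  have hex : ∃ k : Nat, N ≤ pvMagicA a b L (a + (k : Int)) := by
    refine ⟨(a * N - a).toNat, ?_⟩
    have : a + ((a * N - a).toNat : Int) = a * N := by omega
    rw [this]; exact htop
  classical
  let k0 := Nat.find hex
  have hk0 : N ≤ pvMagicA a b L (a + (k0 : Int)) := Nat.find_spec hex
  have hk0min : k0 ≤ (a * N - a).toNat := Nat.find_min' hex (by
    have : a + (((a * N - a).toNat : Nat) : Int) = a * N := by omega
    rw [this]; exact htop)
  refine ⟨a + (k0 : Int), ?_, ?_, by omega, by omega⟩ <;>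
  · have hprev : pvMagicA a b L (a + (k0 : Int) - 1) < N := by
      rcases Nat.eq_zero_or_pos k0 with hz | hpos
      · have he : a + ((k0 : Nat) : Int) - 1 = a - 1 := by omega
        rw [he]
        have hzero : pvMagicA a b L (a - 1) = 0 := by
          unfold pvMagicA
          have d1 : PySem.Int.floordiv (a - 1) a = 0 := by
            rw [PySem.Int.floordiv_eq_iff_of_pos (by omega)]; omega
          have d2 : PySem.Int.floordiv (a - 1) b = 0 := by
            rw [PySem.Int.floordiv_eq_iff_of_pos (by omega)]; omega
          have d3 : PySem.Int.floordiv (a - 1) L = 0 := by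
            rw [PySem.Int.floordiv_eq_iff_of_pos (by omega)]; omega
          omega
        omega
      · have hm := Nat.find_min hex (show k0 - 1 < k0 by omega)
        push Not at hm
        have he : a + ((k0 - 1 : Nat) : Int) = a + (k0 : Int) - 1 := by omega
        rw [he] at hm
        exact hm
    have hstep := pvCntStep a b L (a + (k0 : Int)) ha (by omega) hL hiff
    by_cases hd : a ∣ (a + (k0 : Int)) ∨ b ∣ (a + (k0 : Int))
    · rw [if_pos hd] at hstep
      first
      | exact hd
      | omega
    · rw [if_neg hd] at hstep
      omega

-- both searches, run on the common (min, max) pair, return the same value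
theorem pvMainCore (N a b : Int) (hN : 1 ≤ N) (ha : 1 ≤ a) (hab : a ≤ b) :
    PySem.Int.mod (pvBsA a b (PySem.Int.floordiv (a * b) (pvGcdA a b)) N a (a * N)) (10 ^ 9 + 7)
      = PySem.Int.mod (pvLoopB a b (PySem.Int.floordiv (a * b) (pvGcdB a b)) N a (a * N)) (10 ^ 9 + 7) := by
  rw [pvGcdA_eq a b ha hab]
  have hgval : pvGcdB a b = Int.gcd a b := pvGcdB_eq_gcd a b (by omega) (by omega)
  have hgpos : 0 < (Int.gcd a b : Int) := by
    have h := Int.gcd_pos_of_ne_zero_left b (show a ≠ 0 by omega)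
    exact_mod_cast h
  have hml : (Int.gcd a b : Int) * (Int.lcm a b : Int) = a * b := by
    have h : (Int.gcd a b : Int) * (Int.lcm a b : Int) = (a.natAbs : Int) * (b.natAbs : Int) := by
      exact_mod_cast Int.gcd_mul_lcm a b
    rwa [Int.natAbs_of_nonneg (by omega), Int.natAbs_of_nonneg (by omega)] at h
  set L := PySem.Int.floordiv (a * b) (pvGcdB a b) with hLdef
  have hLval : L = (Int.lcm a b : Int) := by
    rw [hLdef, hgval, ← hml, PySem.Int.floordiv_eq_ediv_of_pos hgpos,
      Int.mul_ediv_cancel_left _ (ne_of_gt hgpos)]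
  have hLpos : 0 < L := by
    rw [hLval]; nlinarith
  have hbL : b ≤ L := by
    rw [hLval]
    exact Int.le_of_dvd (by rw [← hLval]; exact hLpos) (Int.dvd_lcm_right a b)
  have hiff : ∀ z, L ∣ z ↔ a ∣ z ∧ b ∣ z := by
    intro z
    rw [hLval]
    constructor
    · intro h
      exact ⟨dvd_trans (Int.dvd_lcm_left a b) h, dvd_trans (Int.dvd_lcm_right a b) h⟩
    · rintro ⟨h1, h2⟩
      have hn := Int.lcm_dvd (Int.dvd_natAbs.mpr h1) (Int.dvd_natAbs.mpr h2)
      exact Int.dvd_natAbs.mp (Int.natCast_dvd_natCast.mpr hn)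
  obtain ⟨m, hmd, hmc, hma, hmaN⟩ :=
    pvExists a b L N (by omega) hab hbL hLpos hiff hN
  rw [pvBsA_finds a b L N m (by omega) (by omega) hLpos hiff hmd hmc a (a * N) hma hmaN,
    pvLoopB_finds a b L N m (by omega) (by omega) hLpos hiff hmd hmc a (a * N) hma hmaN]

-- ===== VERDICT (by name: the statement is the Claim_ definition above) =====
theorem nthMagicalNumber_spec : Claim_equal_nthMagicalNumber := by
  intro N A B _ hpre
  obtain ⟨hN, hA, hB⟩ := hpre
  unfold Spec_nthMagicalNumber
  simp only [nthMagicalNumber, nthMagicalNumber_alt]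
  rcases lt_trichotomy A B with hAB | hAB | hAB
  · rw [if_neg (by omega : ¬ A ≥ B), if_neg (by omega : ¬ A ≥ B),
      if_pos (by omega : A ≤ B), if_pos (by omega : A ≤ B)]
    exact pvMainCore N A B hN hA (by omega)
  · subst hAB
    rw [if_pos (le_refl A)]
    exact pvMainCore N A A hN hA (le_refl A)
  · rw [if_pos (by omega : A ≥ B), if_pos (by omega : A ≥ B),
      if_neg (by omega : ¬ A ≤ B), if_neg (by omega : ¬ A ≤ B)]
    exact pvMainCore N B A hN hB (by omega)
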